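-- pv_equiv track=rewrite | github.com/pahuja-gor/CodePath-Technical-Interview-Exercises | Week 1 - Session 2/main.py | f15
-- ===== SOURCE A (Python) =====
-- def f15(my_list):
--   total = 0
--   for i in my_list:
--     for j in my_list:
--       k = 1
--       while k < len(my_list):
--         total += i * j * k
--         k *= 2
--   return total
-- ===== SOURCE B (Python) =====
-- def f15(my_list):
--     # closed form: total = (sum)^2 * (sum of powers of 2 below len)
--     n = len(my_list)
--     s = sum(my_list)
--     p = (1 << (n - 1).bit_length()) - 1 if n >= 2 else 0
--     return s * s * p
-- ===== Notes on version B (the rewrite author's own statement) =====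
-- stated objective: faster
-- what changed: Replaced the nested loops and doubling inner while by the closed form (sum of list)^2 * (2^bit_length(n-1) - 1), since i*j*k factors over the three sums.
import Mathlib
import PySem

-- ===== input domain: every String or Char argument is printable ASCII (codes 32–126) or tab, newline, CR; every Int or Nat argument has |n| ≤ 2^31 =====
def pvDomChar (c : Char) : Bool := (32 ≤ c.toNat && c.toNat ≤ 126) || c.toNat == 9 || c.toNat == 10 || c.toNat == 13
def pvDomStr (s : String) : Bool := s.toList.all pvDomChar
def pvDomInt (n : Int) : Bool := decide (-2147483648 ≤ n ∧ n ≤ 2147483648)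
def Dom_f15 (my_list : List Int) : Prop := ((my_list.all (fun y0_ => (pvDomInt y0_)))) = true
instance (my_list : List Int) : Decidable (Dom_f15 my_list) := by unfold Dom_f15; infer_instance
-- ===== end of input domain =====

-- B replaces A's nested loops and doubling while by the closed form s^2 * (2^bitlen(n-1) - 1); asymptotically faster.

-- ===== PORT A =====
-- inner 'while k < len: total += i*j*k; k *= 2'; the 0 < k conjunct is only a
-- termination guard (k starts at 1 and only doubles, so it always holds on reachable states)
def f15whileK (n : Nat) (i j : Int) (k : Nat) (total : Int) : Int :=
  if _h : 0 < k ∧ k < n then f15whileK n i j (2 * k) (total + i * j * (k : Int)) else total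
termination_by n - k
decreasing_by omega

def f15 (my_list : List Int) : Int :=
  my_list.foldl (fun total i =>
    my_list.foldl (fun total j => f15whileK my_list.length i j 1 total) total) 0

-- ===== PORT B =====
-- (n-1).bit_length() for n ≥ 2 is Nat.log2 (n-1) + 1
def f15_alt (my_list : List Int) : Int :=
  let n := my_list.length
  let s := my_list.sum
  let p : Int := if 2 ≤ n then 2 ^ (Nat.log2 (n - 1) + 1) - 1 else 0
  s * s * p

-- ===== PRECONDITION & SPEC =====
def Spec_f15 (my_list : List Int) (out : Int) : Prop := out = f15_alt my_list
instance (my_list : List Int) (out : Int) : Decidable (Spec_f15 my_list out) := by unfold Spec_f15; infer_instance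

-- ===== CLAIM (what is proved, stated in full; the proofs are below) =====
def Claim_equal_f15 : Prop := ∀ (my_list : List Int), Dom_f15 my_list → Spec_f15 my_list (f15 my_list)

-- ===== LEMMAS AND PROOFS =====

-- the geometric sum A's while accumulates: k + 2k + 4k + … while < n
def f15G (n : Nat) (k : Nat) : Nat :=
  if _h : 0 < k ∧ k < n then k + f15G n (2 * k) else 0
termination_by n - k
decreasing_by omega

theorem whileK_eq (n : Nat) (i j : Int) (k : Nat) (t : Int) :
    f15whileK n i j k t = t + i * j * (f15G n k : Int) := by
  fun_induction f15whileK n i j k t with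
  | case1 k t h ih =>
      rw [f15G, dif_pos h, ih]
      push_cast
      ring
  | case2 k t h =>
      rw [f15G, dif_neg h]
      simp

theorem foldl_linear (c : Int) (l : List Int) (t : Int) :
    l.foldl (fun t x => t + c * x) t = t + c * l.sum := by
  induction l generalizing t with
  | nil => simp
  | cons a l ih => simp [List.foldl_cons, ih]; ring

theorem G_closed (n k : Nat) (hk : 0 < k) (hkn : k < n) :
    f15G n k = 2 ^ (Nat.log2 ((n - 1) / k) + 1) * k - k := by
  rw [f15G, dif_pos ⟨hk, hkn⟩]
  by_cases h2 : 2 * k < n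
  · have ih := G_closed n (2 * k) (by omega) h2
    rw [ih]
    have hq2 : 2 ≤ (n - 1) / k := Nat.le_div_iff_mul_le hk |>.2 (by omega)
    have hdd : (n - 1) / (2 * k) = ((n - 1) / k) / 2 := by
      rw [Nat.mul_comm, Nat.div_div_eq_div_mul, Nat.mul_comm]
    have hlog : Nat.log2 ((n - 1) / k) = Nat.log2 ((n - 1) / (2 * k)) + 1 := by
      rw [hdd, Nat.log2_def]
      simp [hq2]
    rw [hlog]
    set L := Nat.log2 ((n - 1) / (2 * k)) with hL
    have h1 : 2 * k ≤ 2 ^ (L + 1) * (2 * k) := Nat.le_mul_of_pos_left _ (Nat.pow_pos (by omega))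
    have h2 : k ≤ 2 ^ (L + 1 + 1) * k := Nat.le_mul_of_pos_left _ (Nat.pow_pos (by omega))
    zify [h1, h2]
    ring
  · -- last iteration: 2k ≥ n, recursive call returns 0
    rw [f15G, dif_neg (by omega)]
    have hq1 : (n - 1) / k = 1 := by
      have hlo : 1 ≤ (n - 1) / k := Nat.le_div_iff_mul_le hk |>.2 (by omega)
      have hhi : (n - 1) / k < 2 := Nat.div_lt_iff_lt_mul hk |>.2 (by omega)
      omega
    rw [hq1]
    have : Nat.log2 1 = 0 := by rw [Nat.log2_def]; simp
    rw [this]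
    omega
termination_by n - k
decreasing_by omega

theorem G_one (n : Nat) :
    (f15G n 1 : Int) = if 2 ≤ n then 2 ^ (Nat.log2 (n - 1) + 1) - 1 else 0 := by
  by_cases h : 2 ≤ n
  · rw [G_closed n 1 (by omega) (by omega), Nat.div_one, Nat.mul_one, if_pos h]
    have hpow : 1 ≤ 2 ^ (Nat.log2 (n - 1) + 1) := Nat.one_le_two_pow
    push_cast [hpow]
    ring
  · rw [f15G]
    have : ¬ (0 < 1 ∧ 1 < n) := by omega
    rw [dif_neg this]
    simp [h]

-- ===== VERDICT (by name: the statement is the Claim_ definition above) =====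
theorem f15_spec : Claim_equal_f15 := by
  intro my_list _
  unfold Spec_f15 f15 f15_alt
  have hin : ∀ (i t : Int),
      my_list.foldl (fun total j => f15whileK my_list.length i j 1 total) t
        = t + (i * (f15G my_list.length 1 : Int)) * my_list.sum := by
    intro i t
    have := foldl_linear (i * (f15G my_list.length 1 : Int)) my_list t
    rw [← this]
    apply PySem.List.foldl_congr_mem
    intro t j _
    rw [whileK_eq]
    ring
  calc my_list.foldl (fun total i =>
        my_list.foldl (fun total j => f15whileK my_list.length i j 1 total) total) 0
      = my_list.foldl (fun t i => t + ((f15G my_list.length 1 : Int) * my_list.sum) * i) 0 := by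
        apply PySem.List.foldl_congr_mem
        intro t i _
        rw [hin]; ring
    _ = my_list.sum * my_list.sum *
          (if 2 ≤ my_list.length then 2 ^ (Nat.log2 (my_list.length - 1) + 1) - 1 else 0) := by
        rw [foldl_linear, ← G_one]; ring
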